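-- pv_equiv track=rewrite | github.com/jayl2sw/Algorithm | Programmers/kakao/2020/괄호 변환.py | solution
-- ===== SOURCE A (Python) =====
-- from collections import deque
--
-- def check(brackets):
--     idx = 0
--     temp = 0
--     while temp >= 0 and idx < len(brackets):
--         if brackets[idx] == '(':
--             temp += 1
--         else:
--             temp -= 1
--         idx += 1
--     if idx == len(brackets):
--         return True
--     else:
--         return False
--
-- def solution(p):
--     answer = ''
--     if not p:
--         return answer
--
--     v = deque(p)
--
--     while v:
--         n = 0
--         balance = 0
--         u = ''
--
--         while n == 0 or balance != 0 and v:
--             tmp = v.popleft()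
--             u += tmp
--             if tmp == '(':
--                 balance += 1
--             else:
--                 balance -= 1
--             n += 1
--
--         if check(u):
--             answer += u
--         else:
--             break
--     else:
--         return answer
--
--     temp = '(' + solution(v) + ')'
--     for bracket in u[1:len(u)-1]:
--         if bracket == '(':
--             temp += ')'
--         else:
--             temp += '('
--
--
--     answer += temp
--     return answer
-- ===== SOURCE B (Python) =====
-- def _check(u):
--     # every running balance except the one after the last char must stay >= 0
--     bal = 0
--     for c in u[:-1]:
--         bal += 1 if c == '(' else -1
--         if bal < 0:
--             return False
--     return True
--
-- def solution(p):
--     if not p: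
--         return ''
--     bal = 0
--     k = len(p)
--     for i, c in enumerate(p):
--         bal += 1 if c == '(' else -1
--         if bal == 0:
--             k = i + 1
--             break
--     u, v = p[:k], p[k:]
--     if _check(u):
--         return u + solution(v)
--     return '(' + solution(v) + ')' + ''.join(')' if c == '(' else '(' for c in u[1:-1])
-- ===== Notes on version B (the rewrite author's own statement) =====
-- stated objective: simpler
-- what changed: Replaces A's deque-driven outer while-loop (greedily consuming several correct chunks into an accumulator string, with a while-else and a break) by direct structural recursion on string slices: one scan finds where the running balance first returns to zero, the string is split there, and the result is assembled from the recursive call on the tail; the balanced chunk is no longer built character by character.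
import Mathlib
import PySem

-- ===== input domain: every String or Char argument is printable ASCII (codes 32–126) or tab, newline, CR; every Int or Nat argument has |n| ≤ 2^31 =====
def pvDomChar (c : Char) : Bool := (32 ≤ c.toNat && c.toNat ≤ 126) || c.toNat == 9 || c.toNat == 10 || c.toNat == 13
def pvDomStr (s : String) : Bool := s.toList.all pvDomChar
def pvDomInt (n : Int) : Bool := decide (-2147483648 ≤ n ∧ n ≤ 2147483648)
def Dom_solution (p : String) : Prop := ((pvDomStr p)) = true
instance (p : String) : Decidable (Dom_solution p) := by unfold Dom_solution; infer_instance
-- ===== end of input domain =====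

-- B replaces A's deque + accumulating outer while-loop by direct recursion on string slices; objective: simpler.

-- ===== PORT A =====

-- A's check: while temp >= 0 and idx < len(brackets): ... ; return idx == len(brackets)
def checkLoopA (temp : Int) (brackets : List Char) : Bool :=
  match brackets with
  | [] => true
  | c :: rest =>
    if temp < 0 then false
    else checkLoopA (temp + (if c = '(' then 1 else -1)) rest

def checkA (brackets : List Char) : Bool := checkLoopA 0 brackets

-- A's inner while `while n == 0 or balance != 0 and v:`, state after the first pop:
-- keep popping while the balance is nonzero and the deque is nonempty.
def chunkGo (balance : Int) (u : List Char) (v : List Char) : List Char × List Char :=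
  match v with
  | [] => (u, [])
  | c :: rest =>
    if balance = 0 then (u, c :: rest)
    else chunkGo (balance + (if c = '(' then 1 else -1)) (u ++ [c]) rest

theorem chunkGo_snd_length_le (v : List Char) : ∀ (balance : Int) (u : List Char),
    (chunkGo balance u v).2.length ≤ v.length := by
  induction v with
  | nil => intro balance u; simp [chunkGo]
  | cons c rest ih =>
    intro balance u
    rw [chunkGo]
    split
    · simp
    · exact le_trans (ih _ _) (by simp)

mutual
-- A's outer `while v:` with the `answer` accumulator; the break branch appends
-- '(' + solution(v) + ')' + flipped u[1:len(u)-1].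
def solALoop (v : List Char) (answer : List Char) : List Char :=
  match v with
  | [] => answer
  | c :: rest =>
    let uv := chunkGo (if c = '(' then 1 else -1) [c] rest
    if checkA uv.1 then solALoop uv.2 (answer ++ uv.1)
    else
      answer ++
        ((('(' : Char) :: solA uv.2) ++ [')'] ++
          (PySem.List.slice uv.1 (some 1) (some ((uv.1.length : Int) - 1))).foldl
            (fun acc b => acc ++ [if b = '(' then ')' else '(']) [])
termination_by (v.length, 0)
decreasing_by
  · exact Prod.Lex.left _ _ (Nat.lt_succ_of_le (chunkGo_snd_length_le _ _ _))
  · exact Prod.Lex.left _ _ (Nat.lt_succ_of_le (chunkGo_snd_length_le _ _ _))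

def solA (p : List Char) : List Char :=
  if p = [] then [] else solALoop p []
termination_by (p.length, 1)
decreasing_by
  · exact Prod.Lex.right _ (by omega)
end

def solution (p : String) : String := String.mk (solA p.toList)

-- ===== PORT B =====

-- B's _check: running balances over u[:-1] must stay >= 0
def checkBGo (bal : Int) (v : List Char) : Bool :=
  match v with
  | [] => true
  | c :: rest =>
    if bal + (if c = '(' then 1 else -1) < 0 then false
    else checkBGo (bal + (if c = '(' then 1 else -1)) rest

def checkB (u : List Char) : Bool := checkBGo 0 (PySem.List.slice u none (some (-1)))

-- B's enumerate scan: first index i with running balance 0 gives k = i+1, else k = len(p)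
def findKGo (bal : Int) (i : Nat) (v : List Char) (len : Nat) : Nat :=
  match v with
  | [] => len
  | c :: rest =>
    if bal + (if c = '(' then 1 else -1) = 0 then i + 1
    else findKGo (bal + (if c = '(' then 1 else -1)) (i + 1) rest len

theorem findKGo_pos (v : List Char) : ∀ (bal : Int) (i len : Nat), 1 ≤ len →
    1 ≤ findKGo bal i v len := by
  induction v with
  | nil => intro bal i len h; simpa [findKGo] using h
  | cons c rest ih =>
    intro bal i len h
    rw [findKGo]
    by_cases hb : bal + (if c = '(' then 1 else -1) = 0
    · rw [if_pos hb]; omega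
    · rw [if_neg hb]; exact ih _ _ _ h

def solB (p : List Char) : List Char :=
  match p with
  | [] => []
  | c :: rest =>
    let k := findKGo 0 0 (c :: rest) (c :: rest).length
    let u := (c :: rest).take k
    let v := (c :: rest).drop k
    if checkB u then u ++ solB v
    else
      (('(' : Char) :: solB v) ++ [')'] ++
        (PySem.List.slice u (some 1) (some (-1))).map (fun x => if x = '(' then ')' else '(')
termination_by p.length
decreasing_by
  all_goals
    have h1 := findKGo_pos (c :: rest) 0 0 (c :: rest).length (by simp)
    show ((c :: rest).drop (findKGo 0 0 (c :: rest) (c :: rest).length)).length < (c :: rest).length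
    rw [List.length_drop]
    have h2 : 1 ≤ (c :: rest).length := by simp
    omega

def solution_alt (p : String) : String := String.mk (solB p.toList)

-- ===== PRECONDITION & SPEC =====
def Spec_solution (p : String) (out : String) : Prop := out = solution_alt p
instance (p : String) (out : String) : Decidable (Spec_solution p out) := by unfold Spec_solution; infer_instance

-- ===== CLAIM (what is proved, stated in full; the proofs are below) =====
def Claim_equal_solution : Prop := ∀ (p : String), Dom_solution p → Spec_solution p (solution p)

-- ===== LEMMAS AND PROOFS =====

theorem checkLoop_eq_checkBGo (u : List Char) : ∀ (temp : Int), 0 ≤ temp →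
    checkLoopA temp u = checkBGo temp u.dropLast := by
  induction u with
  | nil => intro temp h; rfl
  | cons c rest ih =>
    intro temp h
    cases rest with
    | nil => simp [checkLoopA, checkBGo, not_lt.mpr h]
    | cons d rest' =>
      rw [checkLoopA, if_neg (not_lt.mpr h)]
      rw [show (c :: d :: rest').dropLast = c :: (d :: rest').dropLast by simp]
      rw [checkBGo]
      by_cases hb : temp + (if c = '(' then 1 else -1) < 0
      · rw [if_pos hb, checkLoopA, if_pos hb]
      · rw [if_neg hb]
        exact ih _ (by omega)

theorem checkA_eq_checkB (u : List Char) : checkA u = checkB u := by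
  unfold checkA checkB
  rw [PySem.List.slice_to_neg_one]
  exact checkLoop_eq_checkBGo u 0 le_rfl

theorem findKGo_lb (v : List Char) : ∀ (bal : Int) (i len : Nat),
    min (i + 1) len ≤ findKGo bal i v len := by
  induction v with
  | nil => intro bal i len; simp [findKGo]
  | cons c rest ih =>
    intro bal i len
    rw [findKGo]
    by_cases hb : bal + (if c = '(' then 1 else -1) = 0
    · rw [if_pos hb]; omega
    · rw [if_neg hb]
      have := ih (bal + (if c = '(' then 1 else -1)) (i + 1) len
      omega

-- A's chunk extractor consumes exactly the k characters found by B's scan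
theorem chunkGo_eq_split (v : List Char) : ∀ (bal : Int) (u : List Char) (i len : Nat),
    bal ≠ 0 → len = i + v.length →
    chunkGo bal u v =
      (u ++ v.take (findKGo bal i v len - i), v.drop (findKGo bal i v len - i)) := by
  induction v with
  | nil => intro bal u i len h hlen; simp [chunkGo, findKGo, hlen]
  | cons c rest ih =>
    intro bal u i len h hlen
    rw [chunkGo, if_neg h, findKGo]
    by_cases hb : bal + (if c = '(' then 1 else -1) = 0
    · rw [if_pos hb]
      have hstop : chunkGo (bal + (if c = '(' then 1 else -1)) (u ++ [c]) rest = (u ++ [c], rest) := by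
        cases rest with
        | nil => simp [chunkGo]
        | cons d r => rw [chunkGo, if_pos hb]
      rw [hstop]
      simp
    · rw [if_neg hb]
      have hlen' : len = (i + 1) + rest.length := by simp at hlen; omega
      rw [ih (bal + (if c = '(' then 1 else -1)) (u ++ [c]) (i + 1) len hb hlen']
      have hlb := findKGo_lb rest (bal + (if c = '(' then 1 else -1)) (i + 1) len
      have hge : i + 1 ≤ findKGo (bal + (if c = '(' then 1 else -1)) (i + 1) rest len := by omega
      rw [show findKGo (bal + (if c = '(' then 1 else -1)) (i + 1) rest len - i
            = (findKGo (bal + (if c = '(' then 1 else -1)) (i + 1) rest len - (i + 1)) + 1 by omega]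
      rw [List.take_succ_cons, List.drop_succ_cons]
      simp

-- the chunk A pops off the deque equals B's slice split at k
theorem split_chunk (c : Char) (rest : List Char) :
    chunkGo (if c = '(' then 1 else -1) [c] rest =
      ((c :: rest).take (findKGo 0 0 (c :: rest) (c :: rest).length),
       (c :: rest).drop (findKGo 0 0 (c :: rest) (c :: rest).length)) := by
  have hδ : (if c = '(' then (1 : Int) else -1) ≠ 0 := by split <;> omega
  have hk0 : findKGo 0 0 (c :: rest) (c :: rest).length
      = findKGo (if c = '(' then 1 else -1) 1 rest (c :: rest).length := by
    rw [findKGo, if_neg (by simpa using hδ)]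
    simp
  obtain ⟨m, hm⟩ : ∃ m, findKGo (if c = '(' then (1 : Int) else -1) 1 rest (c :: rest).length = m + 1 := by
    have hlb := findKGo_lb rest (if c = '(' then (1 : Int) else -1) 1 (c :: rest).length
    have hlen : (c :: rest).length = rest.length + 1 := by simp
    exact ⟨findKGo (if c = '(' then (1 : Int) else -1) 1 rest (c :: rest).length - 1, by omega⟩
  have hchunk := chunkGo_eq_split rest (if c = '(' then 1 else -1) [c] 1 (c :: rest).length hδ
    (by rw [List.length_cons]; omega)
  rw [hm] at hchunk
  rw [hk0, hm, hchunk]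
  simp [List.take_succ_cons, List.drop_succ_cons]

theorem foldl_flip (l : List Char) : ∀ (acc : List Char),
    l.foldl (fun acc b => acc ++ [if b = '(' then ')' else '(']) acc =
      acc ++ l.map (fun x => if x = '(' then ')' else '(') := by
  induction l with
  | nil => simp
  | cons c rest ih => intro acc; simp [List.foldl, ih]

-- A's slice u[1:len(u)-1] equals B's u[1:-1] on the nonempty chunks both produce
theorem slice_interior (u : List Char) (hu : u ≠ []) :
    PySem.List.slice u (some 1) (some ((u.length : Int) - 1)) =
      PySem.List.slice u (some 1) (some (-1)) := by
  cases u with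
  | nil => simp at hu
  | cons c rest =>
    have h1 : ((c :: rest).length : Int) - 1 = ((rest.length : Nat) : Int) := by simp
    rw [h1]
    have hA := PySem.List.slice_natCast (c :: rest) 1 rest.length
    push_cast at hA
    rw [hA]
    symm
    simp [PySem.List.slice]

-- A's outer loop with accumulator `answer` computes answer ++ (B's recursion)
theorem solALoop_eq (n : Nat) : ∀ (v : List Char), v.length ≤ n → ∀ (answer : List Char),
    solALoop v answer = answer ++ solB v := by
  induction n with
  | zero =>
    intro v hv answer
    cases v with
    | nil => simp [solALoop.eq_def, solB.eq_def]
    | cons c rest => simp at hv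
  | succ n ih =>
    intro v hv answer
    cases v with
    | nil => simp [solALoop.eq_def, solB.eq_def]
    | cons c rest =>
      have hk1 : 1 ≤ findKGo 0 0 (c :: rest) (c :: rest).length :=
        findKGo_pos _ _ _ _ (by simp)
      have hdrop_le : ((c :: rest).drop (findKGo 0 0 (c :: rest) (c :: rest).length)).length ≤ n := by
        rw [List.length_drop]
        have h2 : 1 ≤ (c :: rest).length := by simp
        omega
      have hne : (c :: rest).take (findKGo 0 0 (c :: rest) (c :: rest).length) ≠ [] := by
        obtain ⟨m, hm⟩ : ∃ m, findKGo 0 0 (c :: rest) (c :: rest).length = m + 1 :=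
          ⟨findKGo 0 0 (c :: rest) (c :: rest).length - 1, by omega⟩
        rw [hm, List.take_succ_cons]
        simp
      rw [solALoop.eq_def, solB.eq_def]
      dsimp only
      simp only [split_chunk]
      rw [checkA_eq_checkB]
      by_cases hcb : checkB ((c :: rest).take (findKGo 0 0 (c :: rest) (c :: rest).length)) = true
      · simp only [hcb, if_true]
        rw [ih _ hdrop_le]
        simp
      · simp only [hcb, if_false, Bool.false_eq_true]
        have hsolA : solA ((c :: rest).drop (findKGo 0 0 (c :: rest) (c :: rest).length)) =
            solB ((c :: rest).drop (findKGo 0 0 (c :: rest) (c :: rest).length)) := by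
          rw [solA.eq_def]
          split
          · rename_i hnil; rw [hnil]; simp [solB.eq_def]
          · rw [ih _ hdrop_le]; simp
        rw [hsolA, foldl_flip, slice_interior _ hne]
        simp

theorem solA_eq_solB (p : List Char) : solA p = solB p := by
  rw [solA.eq_def]
  split
  · rename_i hnil; rw [hnil]; simp [solB.eq_def]
  · rw [solALoop_eq p.length p le_rfl []]
    simp

-- ===== VERDICT (by name: the statement is the Claim_ definition above) =====
theorem solution_spec : Claim_equal_solution := by
  intro p _
  unfold Spec_solution solution solution_alt
  rw [solA_eq_solB]
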